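-- pv_equiv track=rewrite | github.com/Peepow2/ComProgYear1 | 2110101_2-2023/QUIZ/QUIZ2.py | complex_replace
-- ===== SOURCE A (Python) =====
-- def complex_replace(s,k_strs,r_strs):
--     L = list()
--     for i in range(len(k_strs)):
--         if s.find(k_strs[i]) != -1:
--             L.append(s.find(k_strs[i]))
--         else:
--             L.append(9999999999) # set to infinity
--
--     if len(L) != 0 and L.count(9999999999) != len(L):
--         Min = min(L)
--         idx = L.index(Min)
--         return s[:Min] + '<' + r_strs[idx] + '>' + s[Min+len(k_strs[idx]):]
--     return s
-- ===== SOURCE B (Python) =====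
-- def complex_replace(s, k_strs, r_strs):
--     # single left-to-right scan: earliest position wins; ties go to the smallest key index
--     for p in range(len(s) + 1):
--         for i, k in enumerate(k_strs):
--             if s.startswith(k, p):
--                 return s[:p] + '<' + r_strs[i] + '>' + s[p + len(k):]
--     return s
-- ===== Notes on version B (the rewrite author's own statement) =====
-- stated objective: faster
-- what changed: A builds a list of every key's first find position, then takes min() and index() and slices; B is a single left-to-right scan over positions that returns at the first position where any key matches (smallest key index on ties), with no intermediate list and no full find per key.
import Mathlib
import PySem

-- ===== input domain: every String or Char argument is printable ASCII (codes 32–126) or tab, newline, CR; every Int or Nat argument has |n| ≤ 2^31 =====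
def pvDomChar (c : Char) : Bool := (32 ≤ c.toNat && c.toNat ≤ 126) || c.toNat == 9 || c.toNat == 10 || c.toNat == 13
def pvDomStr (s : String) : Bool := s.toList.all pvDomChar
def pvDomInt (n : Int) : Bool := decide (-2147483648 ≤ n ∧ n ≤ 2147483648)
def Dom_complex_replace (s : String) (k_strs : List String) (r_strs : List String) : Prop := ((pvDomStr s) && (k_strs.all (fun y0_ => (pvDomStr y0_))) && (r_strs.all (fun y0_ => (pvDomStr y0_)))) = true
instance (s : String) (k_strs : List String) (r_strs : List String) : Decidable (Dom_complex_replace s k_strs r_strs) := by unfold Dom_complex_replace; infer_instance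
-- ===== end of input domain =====

-- B replaces A's per-key find/min/index passes (a full str.find over s for every key) by one
-- left-to-right scan that returns at the first matching position, smallest key index on ties
-- (same return value wherever A returns; neither mutates its arguments).

-- ===== PORT A =====
def complex_replace (s : String) (k_strs : List String) (r_strs : List String) : String :=
  let L : List Int :=
    (PySem.List.pyRange 0 (k_strs.length : Int) 1).foldl
      (fun L i =>
        if PySem.Str.find s (PySem.List.pyGetD k_strs i "") ≠ -1 then
          L ++ [PySem.Str.find s (PySem.List.pyGetD k_strs i "")]
        else
          L ++ [(9999999999 : Int)]) []
  if L.length ≠ 0 ∧ L.count 9999999999 ≠ L.length then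
    match PySem.List.min? L (fun x => x) with
    | none => s
    | some Min =>
      match PySem.List.index? L Min with
      | none => s
      | some idx =>
        let k := PySem.List.pyGetD k_strs (idx : Int) ""
        -- r_strs[idx] raises IndexError in Python when idx ≥ len(r_strs); such inputs are outside Pre_
        let r := PySem.List.pyGetD r_strs (idx : Int) ""
        String.ofList (PySem.Chars.slice s.toList none (some Min) ++
          '<' :: r.toList ++ '>' ::
          PySem.Chars.slice s.toList (some (Min + (PySem.Str.len k))) none)
  else s

-- ===== PORT B =====
-- first key (with its replacement) matching at the start of `suf`; i is the running key index
def pvFindKey (suf : List Char) (rs : List String) : List String → Int → Option (String × String)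
  | [], _ => none
  | k :: kt, i =>
    if PySem.Chars.startswith suf k.toList then some (k, PySem.List.pyGetD rs i "")
    else pvFindKey suf rs kt (i + 1)

def pvScan (cs : List Char) (ks rs : List String) (suf : List Char) : List Char :=
  match pvFindKey suf rs ks 0 with
  | some (k, r) =>
    let p := cs.length - suf.length
    cs.take p ++ '<' :: r.toList ++ '>' :: cs.drop (p + k.toList.length)
  | none =>
    match suf with
    | [] => cs
    | _ :: rest => pvScan cs ks rs rest
termination_by suf.length

def complex_replace_alt (s : String) (k_strs : List String) (r_strs : List String) : String :=
  String.ofList (pvScan s.toList k_strs r_strs s.toList)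

-- ===== PRECONDITION & SPEC =====
-- Pre_ excludes (a) the inputs on which A raises IndexError — those where the selected key
-- (earliest first occurrence in s, smallest key index on ties) has no replacement at its index
-- in r_strs; Python B raises IndexError on exactly the same inputs — and (b) strings of
-- ≥ 9999999999 characters, where A's "infinity" sentinel collides with a genuine find position
-- (unconstructible in practice; the proof uses this bound). On every input where A returns,
-- Pre_ holds (up to the unconstructible size bound).
def Pre_complex_replace (s : String) (k_strs : List String) (r_strs : List String) : Prop :=
  s.toList.length < 9999999999 ∧
    (∀ j (_ : j < k_strs.length),
      (k_strs[j].toList <:+: s.toList ∧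
        ∀ j' (_ : j' < k_strs.length), k_strs[j'].toList <:+: s.toList →
          (PySem.Chars.find s.toList k_strs[j].toList < PySem.Chars.find s.toList k_strs[j'].toList ∨
           (PySem.Chars.find s.toList k_strs[j].toList = PySem.Chars.find s.toList k_strs[j'].toList ∧ j ≤ j'))) →
      j < r_strs.length)
instance (s : String) (k_strs : List String) (r_strs : List String) : Decidable (Pre_complex_replace s k_strs r_strs) := by unfold Pre_complex_replace; infer_instance

def pvWitness_complex_replace : String × List String × List String := ("abcb", ["b", "c"], ["X", "Y"])

def Spec_complex_replace (s : String) (k_strs : List String) (r_strs : List String) (out : String) : Prop := out = complex_replace_alt s k_strs r_strs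
instance (s : String) (k_strs : List String) (r_strs : List String) (out : String) : Decidable (Spec_complex_replace s k_strs r_strs out) := by unfold Spec_complex_replace; infer_instance

-- ===== CLAIM (what is proved, stated in full; the proofs are below) =====
def Claim_equal_complex_replace : Prop := ∀ (s : String) (k_strs : List String) (r_strs : List String), Dom_complex_replace s k_strs r_strs → Pre_complex_replace s k_strs r_strs → Spec_complex_replace s k_strs r_strs (complex_replace s k_strs r_strs)

-- ===== LEMMAS AND PROOFS =====
def pvE (cs : List Char) (k : String) : Int :=
  if PySem.Chars.find cs k.toList ≠ -1 then PySem.Chars.find cs k.toList else 9999999999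
def pvMatch (cs : List Char) (k : String) (p : Nat) : Prop := k.toList <+: cs.drop p

theorem pv_fold (s : String) (l : List String) (acc : List Int) :
    l.foldl (fun L k =>
        if PySem.Str.find s k ≠ -1 then L ++ [PySem.Str.find s k]
        else L ++ [(9999999999 : Int)]) acc = acc ++ l.map (pvE s.toList) := by
  induction l generalizing acc with
  | nil => simp
  | cons k t ih =>
    simp only [List.foldl_cons, List.map_cons]
    rw [ih]
    have : (if PySem.Str.find s k ≠ -1 then acc ++ [PySem.Str.find s k]
        else acc ++ [(9999999999 : Int)]) = acc ++ [pvE s.toList k] := by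
      simp [pvE]; split_ifs <;> simp
    rw [this]; simp

theorem pv_L_eq (s : String) (ks : List String) :
    (PySem.List.pyRange 0 (ks.length : Int) 1).foldl
      (fun L i =>
        if PySem.Str.find s (PySem.List.pyGetD ks i "") ≠ -1 then
          L ++ [PySem.Str.find s (PySem.List.pyGetD ks i "")]
        else
          L ++ [(9999999999 : Int)]) [] = ks.map (pvE s.toList) := by
  rw [PySem.List.foldl_pyRange_zero_pyGetD' ks ""
      (fun L k => if PySem.Str.find s k ≠ -1 then L ++ [PySem.Str.find s k]
        else L ++ [(9999999999 : Int)]) []]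
  simpa using pv_fold s ks []


theorem pvE_nonneg (cs : List Char) (k : String) : 0 ≤ pvE cs k := by
  unfold pvE; split_ifs with h
  · have := PySem.Chars.neg_one_le_find cs k.toList; omega
  · norm_num

theorem pvE_ne_big_iff (cs : List Char) (k : String) (hlen : cs.length < 9999999999) :
    pvE cs k ≠ 9999999999 ↔ k.toList <:+: cs := by
  unfold pvE; split_ifs with h
  · have h2 := PySem.Chars.find_le_length cs k.toList
    constructor
    · intro _; exact (PySem.Chars.find_ne_neg_one_iff cs k.toList).mp h
    · intro _; omega
  · simp only [ne_eq, not_true_eq_false, false_iff]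
    push_neg at h
    exact (PySem.Chars.find_eq_neg_one_iff cs k.toList).mp h


theorem pvE_of_infix (cs : List Char) (k : String) (h : k.toList <:+: cs) :
    pvE cs k = PySem.Chars.find cs k.toList ∧
    pvMatch cs k (pvE cs k).toNat ∧
    (∀ q < (pvE cs k).toNat, ¬ pvMatch cs k q) := by
  have hne : PySem.Chars.find cs k.toList ≠ -1 :=
    (PySem.Chars.find_ne_neg_one_iff cs k.toList).mpr h
  have hnn : 0 ≤ PySem.Chars.find cs k.toList := by
    have := PySem.Chars.neg_one_le_find cs k.toList; omega
  have hs := PySem.Chars.find_spec hnn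
  have he : pvE cs k = PySem.Chars.find cs k.toList := by unfold pvE; simp [hne]
  refine ⟨he, ?_, ?_⟩
  · rw [he]; exact hs.1
  · rw [he]; intro q hq; exact hs.2 q hq

theorem pvE_le_of_match (cs : List Char) (k : String) (p : Nat) (h : pvMatch cs k p) :
    pvE cs k ≤ (p : Int) := by
  have hinf : k.toList <:+: cs := by
    rw [← PySem.Chars.isIn_iff_infix, ← PySem.Chars.exists_prefix_drop_iff_isIn]
    exact ⟨p, h⟩
  obtain ⟨he, _, hmin⟩ := pvE_of_infix cs k hinf
  by_contra hlt
  push_neg at hlt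
  have hnn : 0 ≤ pvE cs k := by rw [he]; have := PySem.Chars.neg_one_le_find cs k.toList
                                have hne : PySem.Chars.find cs k.toList ≠ -1 :=
                                  (PySem.Chars.find_ne_neg_one_iff cs k.toList).mpr hinf
                                omega
  exact hmin p (by omega) h


theorem pvFindKey_none (suf : List Char) (rs : List String) (kt : List String) (i : Int)
    (h : ∀ k ∈ kt, ¬ k.toList <+: suf) : pvFindKey suf rs kt i = none := by
  induction kt generalizing i with
  | nil => rfl
  | cons k t ih =>
    unfold pvFindKey
    have : ¬ PySem.Chars.startswith suf k.toList = true := by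
      rw [PySem.Chars.startswith_iff]; exact h k (by simp)
    simp only [this, if_false, Bool.false_eq_true, if_neg]
    exact ih _ (fun k' hk' => h k' (by simp [hk']))

theorem pvFindKey_least (suf : List Char) (rs : List String) (kt : List String) (i : Int)
    (j : Nat) (hj : j < kt.length) (hm : kt[j].toList <+: suf)
    (hmin : ∀ j' (_ : j' < j) (hlt : j' < kt.length), ¬ kt[j'].toList <+: suf) :
    pvFindKey suf rs kt i = some (kt[j], PySem.List.pyGetD rs (i + (j : Int)) "") := by
  induction kt generalizing i j with
  | nil => simp at hj
  | cons k t ih =>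
    unfold pvFindKey
    cases j with
    | zero =>
      have : PySem.Chars.startswith suf k.toList = true := by
        rw [PySem.Chars.startswith_iff]; simpa using hm
      simp [this]
    | succ j' =>
      have hnk : ¬ PySem.Chars.startswith suf k.toList = true := by
        rw [PySem.Chars.startswith_iff]
        have := hmin 0 (Nat.succ_pos _) (by simp)
        simpa using this
      simp only [hnk, if_neg, Bool.false_eq_true]
      have hrec := ih (i + 1) j' (by simpa using hj) (by simpa using hm)
        (fun a ha hlt => by
          have := hmin (a + 1) (by omega) (by simpa using hlt)
          simpa using this)
      have hcast : i + 1 + (j' : Int) = i + ((j' + 1 : Nat) : Int) := by push_cast; ring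
      rw [hrec, hcast]
      simp

theorem pvScan_none_aux (cs : List Char) (ks rs : List String) :
    ∀ n p, n = cs.length - p → p ≤ cs.length →
    (∀ q k, p ≤ q → k ∈ ks → ¬ pvMatch cs k q) →
    pvScan cs ks rs (cs.drop p) = cs := by
  intro n
  induction n with
  | zero =>
    intro p hn hp h
    have hpe : p = cs.length := by omega
    rw [pvScan.eq_def]
    rw [pvFindKey_none _ _ _ _ (fun k hk => h p k le_rfl hk)]
    simp [hpe]
  | succ m ih =>
    intro p hn hp h
    have hlt : p < cs.length := by omega
    rw [pvScan.eq_def]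
    rw [pvFindKey_none _ _ _ _ (fun k hk => h p k le_rfl hk)]
    rw [List.drop_eq_getElem_cons hlt]
    simp only []
    exact ih (p + 1) (by omega) (by omega) (fun q k hq hk => h q k (by omega) hk)

theorem pvScan_found_aux (cs : List Char) (ks rs : List String) (P j : Nat)
    (hP : P ≤ cs.length) (hj : j < ks.length)
    (hm : pvMatch cs ks[j] P)
    (hleast : ∀ j' (_ : j' < j) (hlt : j' < ks.length), ¬ pvMatch cs ks[j'] P) :
    ∀ n p, n = P - p → p ≤ P →
    (∀ q k, p ≤ q → q < P → k ∈ ks → ¬ pvMatch cs k q) →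
    pvScan cs ks rs (cs.drop p) =
      cs.take P ++ '<' :: (PySem.List.pyGetD rs (j : Int) "").toList ++ '>' ::
        cs.drop (P + ks[j].toList.length) := by
  intro n
  induction n with
  | zero =>
    intro p hn hp hnone
    have hpe : p = P := by omega
    subst hpe
    rw [pvScan.eq_def]
    rw [pvFindKey_least (cs.drop p) rs ks 0 j hj hm
      (fun j' h1 h2 => hleast j' h1 h2)]
    simp only [zero_add, List.length_drop]
    have : cs.length - (cs.length - p) = p := by omega
    rw [this]
  | succ m ih =>
    intro p hn hp hnone
    have hlt : p < P := by omega
    have hplen : p < cs.length := by omega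
    rw [pvScan.eq_def]
    rw [pvFindKey_none _ _ _ _ (fun k hk => hnone p k le_rfl hlt hk)]
    rw [List.drop_eq_getElem_cons hplen]
    simp only []
    exact ih (p + 1) (by omega) (by omega)
      (fun q k hq hqP hk => hnone q k (by omega) hqP hk)

theorem pv_main (s : String) (ks rs : List String)
    (hlen : s.toList.length < 9999999999) :
    complex_replace s ks rs = complex_replace_alt s ks rs := by
  unfold complex_replace complex_replace_alt
  simp only [pv_L_eq]
  by_cases hex : ∃ k ∈ ks, k.toList <:+: s.toList
  · -- some key occurs: both replace at the earliest position / smallest index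
    obtain ⟨k0, hk0, hk0inf⟩ := hex
    have hne : ks ≠ [] := by intro h; subst h; simp at hk0
    have hcnt : (ks.map (pvE s.toList)).count 9999999999 ≠ (ks.map (pvE s.toList)).length := by
      intro hc
      have hall := List.count_eq_length.mp hc
      have := hall (pvE s.toList k0) (List.mem_map_of_mem hk0)
      exact (pvE_ne_big_iff s.toList k0 hlen).mpr hk0inf this.symm
    rw [if_pos ⟨by simpa using hne, hcnt⟩]
    -- extract Min
    cases hmin : PySem.List.min? (ks.map (pvE s.toList)) (fun x => x) with
    | none =>
      exfalso
      exact hne (by simpa using (PySem.List.min?_eq_none_iff _ _).mp hmin)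
    | some Min =>
    dsimp only
    have hMinMem : Min ∈ ks.map (pvE s.toList) := PySem.List.min?_mem hmin
    have hMinLe : ∀ y ∈ ks.map (pvE s.toList), Min ≤ y := by
      intro y hy; exact PySem.List.min?_isMin hmin y hy
    cases hidx : PySem.List.index? (ks.map (pvE s.toList)) Min with
    | none =>
      exfalso
      rw [PySem.List.index?_eq_none_iff] at hidx
      exact hidx hMinMem
    | some idx =>
    dsimp only
    obtain ⟨hidxlt, hLidx, hbefore⟩ := PySem.List.getElem_of_index?_eq_some hidx
    have hidxks : idx < ks.length := by simpa using hidxlt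
    have hLidx' : pvE s.toList ks[idx] = Min := by
      simpa using hLidx
    -- Min is nonnegative and below the sentinel
    have hMin0 : 0 ≤ Min := by
      obtain ⟨k, _, hk⟩ := List.mem_map.mp hMinMem
      rw [← hk]; exact pvE_nonneg _ _
    have hE0 := pvE_of_infix s.toList k0 hk0inf
    have hfle := PySem.Chars.find_le_length s.toList k0.toList
    have hMinlt : Min < 9999999999 := by
      have h1 : Min ≤ pvE s.toList k0 := hMinLe _ (List.mem_map_of_mem hk0)
      have h2 : pvE s.toList k0 = PySem.Chars.find s.toList k0.toList := hE0.1
      omega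
    have hidxinf : ks[idx].toList <:+: s.toList :=
      (pvE_ne_big_iff s.toList ks[idx] hlen).mp (by omega)
    obtain ⟨hEfind, hEmatch, hEmin⟩ := pvE_of_infix s.toList ks[idx] hidxinf
    rw [hLidx'] at hEmatch hEmin hEfind
    set P := Min.toNat with hPdef
    have hPcast : (P : Int) = Min := by omega
    have hPlen : P ≤ s.toList.length := by
      have := PySem.Chars.find_le_length s.toList ks[idx].toList
      omega
    -- no key matches strictly before P
    have hnone : ∀ q k, 0 ≤ q → q < P → k ∈ ks → ¬ pvMatch s.toList k q := by
      intro q k _ hq hk hmatch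
      have h1 := pvE_le_of_match s.toList k q hmatch
      have h2 : Min ≤ pvE s.toList k := hMinLe _ (List.mem_map_of_mem hk)
      omega
    -- idx is the least key index matching at P
    have hleast : ∀ j' (_ : j' < idx) (hlt : j' < ks.length), ¬ pvMatch s.toList ks[j'] P := by
      intro j' hj' hlt hmatch
      have h1 := pvE_le_of_match s.toList ks[j'] P hmatch
      have h2 : Min ≤ pvE s.toList ks[j'] :=
        hMinLe _ (List.mem_map_of_mem (List.getElem_mem hlt))
      have h3 : pvE s.toList ks[j'] = Min := by omega
      exact hbefore j' (by simpa using hj') (by simpa using h3)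
    -- evaluate B by the scan lemma (p = 0)
    have hB := pvScan_found_aux s.toList ks rs P idx hPlen hidxks hEmatch hleast
      P 0 (by omega) (by omega) hnone
    rw [List.drop_zero] at hB
    rw [hB]
    -- evaluate A's slices
    have hk' : PySem.List.pyGetD ks (idx : Int) "" = ks[idx] := by
      rw [PySem.List.pyGetD_natCast]
      simp [hidxks]
    rw [hk']
    congr 1
    rw [PySem.Chars.slice_eq_listSlice, PySem.Chars.slice_eq_listSlice]
    rw [PySem.List.slice_to _ hMin0]
    rw [PySem.List.slice_from _ (by simp [PySem.Str.len_eq]; omega)]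
    have h1 : Min.toNat = P := rfl
    have h2 : (Min + (PySem.Str.len ks[idx])).toNat = P + ks[idx].toList.length := by
      simp [PySem.Str.len_eq]; omega
    rw [h1, h2]
  · -- no key occurs: both return s unchanged
    push_neg at hex
    have hall : ∀ b ∈ ks.map (pvE s.toList), 9999999999 = b := by
      intro b hb
      obtain ⟨k, hk, hkb⟩ := List.mem_map.mp hb
      by_contra hne
      rw [← hkb] at hne
      exact hex k hk ((pvE_ne_big_iff s.toList k hlen).mp (fun h => hne h.symm))
    rw [if_neg]
    · have hB := pvScan_none_aux s.toList ks rs s.toList.length 0 (by omega) (by omega)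
        (fun q k _ hk hmatch => hex k hk (by
          rw [← PySem.Chars.isIn_iff_infix, ← PySem.Chars.exists_prefix_drop_iff_isIn]
          exact ⟨q, hmatch⟩))
      rw [List.drop_zero] at hB
      rw [hB]
      simp
    · intro hcond
      exact hcond.2 (List.count_eq_length.mpr hall)

-- ===== VERDICT (by name: the statement is the Claim_ definition above) =====
theorem complex_replace_spec : Claim_equal_complex_replace := by
  intro s ks rs _hdom hpre
  unfold Spec_complex_replace
  exact pv_main s ks rs hpre.1
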